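-- pv_equiv track=rewrite | github.com/hidehic0/library | code/main.py | article_breakdown
-- ===== SOURCE A (Python) =====
-- def article_breakdown(lis: list[list[int]]) -> list[list[int]]:
--     """個数制限付きナップサック問題用の品物を分解する関数
--
--     個数の値が、各品物の一番右にあれば正常に動作します
--     """
--     res = []
--     for w, v, c in lis:
--         k = 1
--         while c > 0:
--             res.append([w * k, v * k])
--             c -= k
--             k = min(2 * k, c)
--
--     return res
-- ===== SOURCE B (Python) =====
-- def _split(n):
--     """Recursion by halving: for n >= 1 returns (powers, rem) where
--     powers = [1, 2, ..., 2**(m-1)] with 2**m <= n < 2**(m+1) and rem = n - 2**m."""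
--     if n <= 1:
--         return [], 0
--     powers, rem = _split(n // 2)
--     return [1] + [2 * x for x in powers], 2 * rem + (n & 1)
--
--
-- def article_breakdown(lis: list[list[int]]) -> list[list[int]]:
--     """個数制限付きナップサック問題用の品物を分解する関数 (c+1 を再帰的に半分にして分解)"""
--     res = []
--     for w, v, c in lis:
--         powers, rem = _split(c + 1)
--         for k in powers + ([rem] if rem > 0 else []):
--             res.append([w * k, v * k])
--     return res
-- ===== Notes on version B (the rewrite author's own statement) =====
-- stated objective: alternative
-- what changed: Replaces A's subtract-and-double while loop per item by a bottom-up recursion that halves c+1, building the (powers, remainder) chunk pair structurally at each halving step.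
import Mathlib
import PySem

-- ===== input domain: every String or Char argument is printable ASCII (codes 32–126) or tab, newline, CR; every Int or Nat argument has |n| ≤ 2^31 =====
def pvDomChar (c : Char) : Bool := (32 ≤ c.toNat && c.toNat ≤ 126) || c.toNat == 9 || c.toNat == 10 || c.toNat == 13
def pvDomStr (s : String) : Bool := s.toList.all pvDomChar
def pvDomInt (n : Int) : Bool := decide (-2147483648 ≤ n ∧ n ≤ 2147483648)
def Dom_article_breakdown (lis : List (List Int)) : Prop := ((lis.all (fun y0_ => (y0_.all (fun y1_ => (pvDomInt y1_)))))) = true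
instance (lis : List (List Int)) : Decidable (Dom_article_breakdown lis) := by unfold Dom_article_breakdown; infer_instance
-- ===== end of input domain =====

-- B replaces A's subtract-and-double loop by a recursion halving c+1 that builds the (powers, remainder) pair bottom-up; same asymptotic cost, different algorithm.

-- ===== PORT A =====
-- the inner 'while c > 0: append; c -= k; k = min(2k, c)' loop; fuel c.toNat+1 suffices since c drops by k ≥ 1 each step
def pvLoopA (w v : Int) : Nat → Int → Int → List (List Int)
  | 0, _, _ => []
  | fuel+1, c, k => if 0 < c then [w * k, v * k] :: pvLoopA w v fuel (c - k) (min (2 * k) (c - k)) else []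

def article_breakdown (lis : List (List Int)) : List (List Int) :=
  lis.foldl (fun res row =>
    match row with
    | [w, v, c] => res ++ pvLoopA w v (c.toNat + 1) c 1
    | _ => res) []

-- ===== PORT B =====
-- Source B's _split: recursion by halving; 'n // 2' is PySem.Int.floordiv, 'n & 1' is PySem.Int.mod n 2 (exact: both operands handled on the n ≥ 2 branch only)
def pvSplit (n : Int) : List Int × Int :=
  if h : n ≤ 1 then ([], 0)
  else
    let pr := pvSplit (PySem.Int.floordiv n 2)
    (1 :: pr.1.map (fun x => 2 * x), 2 * pr.2 + PySem.Int.mod n 2)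
termination_by n.toNat
decreasing_by
  rw [PySem.Int.floordiv_eq_ediv_of_pos (by omega)]
  omega

-- the per-row body of Source B's loop: unpack (powers, rem), append rem if positive, scale
def pvRowB (w v c : Int) : List (List Int) :=
  let pr := pvSplit (c + 1)
  (pr.1 ++ (if 0 < pr.2 then [pr.2] else [])).map (fun k => [w * k, v * k])

-- tuple unpacking 'for w, v, c in lis' (rows of other lengths lie outside Pre_)
def article_breakdown_alt (lis : List (List Int)) : List (List Int) :=
  lis.foldl (fun res row =>
    if row.length = 3 then res ++ pvRowB row[0]! row[1]! row[2]! else res) []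

-- ===== PRECONDITION & SPEC =====
-- Pre_ excludes only rows that are not 3-tuples: Python A raises ValueError on unpacking there (and B raises identically).
def Pre_article_breakdown (lis : List (List Int)) : Prop := ∀ row ∈ lis, row.length = 3
instance (lis : List (List Int)) : Decidable (Pre_article_breakdown lis) := by unfold Pre_article_breakdown; infer_instance
def pvWitness_article_breakdown : List (List Int) := [[2, 3, 5], [1, 1, 6]]

def Spec_article_breakdown (lis : List (List Int)) (out : List (List Int)) : Prop := out = article_breakdown_alt lis
instance (lis : List (List Int)) (out : List (List Int)) : Decidable (Spec_article_breakdown lis out) := by unfold Spec_article_breakdown; infer_instance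

-- ===== CLAIM (what is proved, stated in full; the proofs are below) =====
def Claim_equal_article_breakdown : Prop := ∀ (lis : List (List Int)), Dom_article_breakdown lis → Pre_article_breakdown lis → Spec_article_breakdown lis (article_breakdown lis)

-- ===== LEMMAS AND PROOFS =====

lemma pvLoopA_nonpos (w v : Int) (f : Nat) (c k : Int) (h : c ≤ 0) :
    pvLoopA w v f c k = [] := by
  cases f with
  | zero => rfl
  | succ f => simp [pvLoopA, show ¬ 0 < c by omega]

/-- Closed form for A's loop: from state (c, k) with 1 ≤ k ≤ c, if m is the
largest exponent with k*(2^m - 1) ≤ c, the loop emits chunks k·2^i (i < m)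
followed by the positive remainder. -/
lemma pvLoopA_closed (w v : Int) : ∀ (n fuel : Nat) (c k : Int) (m : Nat),
    c.toNat ≤ n → c.toNat < fuel → 1 ≤ k → k ≤ c →
    k * (2 ^ m - 1) ≤ c → c < k * (2 ^ (m + 1) - 1) →
    pvLoopA w v fuel c k =
      (List.range m).map (fun i => [w * (k * 2 ^ i), v * (k * 2 ^ i)]) ++
        (if 0 < c - k * (2 ^ m - 1) then
          [[w * (c - k * (2 ^ m - 1)), v * (c - k * (2 ^ m - 1))]] else []) := by
  intro n
  induction n with
  | zero => intro fuel c k m hn _ hk hkc _ _; omega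
  | succ n ih =>
    intro fuel c k m hn hfuel hk hkc hlo hhi
    have hc : 0 < c := by omega
    obtain ⟨f, rfl⟩ : ∃ f, fuel = f + 1 := ⟨fuel - 1, by omega⟩
    cases m with
    | zero => simp at hhi; omega
    | succ m' =>
      have h2m : (2:Int) ^ (m' + 1) = 2 * 2 ^ m' := by ring
      have h2m2 : (2:Int) ^ (m' + 1 + 1) = 4 * 2 ^ m' := by ring
      have hpow1 : (1:Int) ≤ 2 ^ m' := one_le_pow₀ (by norm_num)
      simp only [pvLoopA, if_pos hc]
      by_cases hck : c - k ≤ 0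
      · -- c = k: single chunk, loop ends
        have hck' : c = k := by omega
        have hm0 : m' = 0 := by
          cases m' with
          | zero => rfl
          | succ m'' =>
            have : (4:Int) ≤ 2 ^ (m'' + 1 + 1) := by
              have : (1:Int) ≤ 2 ^ m'' := one_le_pow₀ (by norm_num)
              calc (4:Int) ≤ 4 * 2 ^ m'' := by linarith
                _ = 2 ^ (m'' + 1 + 1) := by ring
            nlinarith [hlo]
        subst hm0
        rw [pvLoopA_nonpos w v f _ _ (by omega)]
        norm_num
        omega
      · by_cases hmin : c - k < 2 * k
        · -- final remainder chunk: next k is c - k, then done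
          have hm0 : m' = 0 := by
            cases m' with
            | zero => rfl
            | succ m'' =>
              have h1 : (1:Int) ≤ 2 ^ m'' := one_le_pow₀ (by norm_num)
              have : (2:Int) ^ (m'' + 1 + 1) = 4 * 2 ^ m'' := by ring
              nlinarith [hlo]
          subst hm0
          have hmin' : min (2 * k) (c - k) = c - k := by omega
          rw [hmin']
          obtain ⟨f', rfl⟩ : ∃ f', f = f' + 1 := ⟨f - 1, by omega⟩
          simp only [pvLoopA, if_pos (show (0:Int) < c - k by omega)]
          rw [pvLoopA_nonpos w v f' _ _ (by omega)]
          norm_num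
          omega
        · -- doubling step: recurse with (c - k, 2k) and exponent m'
          have hmin' : min (2 * k) (c - k) = 2 * k := by omega
          rw [hmin']
          rw [ih f (c - k) (2 * k) m' (by omega) (by omega) (by omega) (by omega)
              (by nlinarith [hlo]) (by nlinarith [hhi])]
          rw [List.range_succ_eq_map]
          simp only [List.map_cons, List.map_map]
          have hrem : c - k - 2 * k * (2 ^ m' - 1) = c - k * (2 ^ (m' + 1) - 1) := by
            rw [h2m]; ring
          rw [hrem]
          simp only [List.cons_append]
          congr 1
          · norm_num
          · congr 1
            apply List.map_congr_left
            intro i _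
            simp only [Function.comp, pow_succ]
            ring_nf

/-- B's halving recursion returns the ascending powers of two below some 2^m
bracketing n, together with the remainder n - 2^m. -/
lemma pvSplit_spec : ∀ (s : Nat) (n : Int), n.toNat ≤ s → 1 ≤ n →
    ∃ m : Nat, pvSplit n = ((List.range m).map (fun i => (2:Int) ^ i), n - 2 ^ m) ∧
      (2:Int) ^ m ≤ n ∧ n < 2 ^ (m + 1) := by
  intro s
  induction s with
  | zero => intro n hs h1; omega
  | succ s ih =>
    intro n hs h1
    by_cases h : n ≤ 1
    · refine ⟨0, ?_, by omega, by norm_num; omega⟩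
      have : n = 1 := by omega
      subst this
      rw [pvSplit]
      norm_num
    · have hfd : PySem.Int.floordiv n 2 = n / 2 :=
        PySem.Int.floordiv_eq_ediv_of_pos (by omega)
      have hmd : PySem.Int.mod n 2 = n % 2 :=
        PySem.Int.mod_eq_emod_of_pos (by omega)
      obtain ⟨m', heq, hlo, hhi⟩ := ih (n / 2) (by omega) (by omega)
      refine ⟨m' + 1, ?_, ?_, ?_⟩
      · rw [pvSplit, dif_neg h, hfd, heq, hmd]
        simp only [Prod.mk.injEq]
        constructor
        · rw [List.range_succ_eq_map]
          simp only [List.map_cons, List.map_map, pow_zero]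
          congr 1
          apply List.map_congr_left
          intro i _
          simp only [Function.comp, pow_succ]
          ring
        · have h2 : (2:Int) ^ (m' + 1) = 2 * 2 ^ m' := by ring
          omega
      · have h2 : (2:Int) ^ (m' + 1) = 2 * 2 ^ m' := by ring
        omega
      · have h2 : (2:Int) ^ (m' + 1 + 1) = 2 * 2 ^ (m' + 1) := by ring
        have h2' : (2:Int) ^ (m' + 1) = 2 * 2 ^ m' := by ring
        omega

lemma pvRow_eq (w v c : Int) :
    pvLoopA w v (c.toNat + 1) c 1 = pvRowB w v c := by
  by_cases hc : c ≤ 0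
  · rw [pvLoopA_nonpos w v _ _ _ hc]
    unfold pvRowB
    rw [pvSplit]
    simp [show c + 1 ≤ 1 by omega]
  · push_neg at hc
    obtain ⟨m, heq, hlo, hhi⟩ := pvSplit_spec (c + 1).toNat (c + 1) (le_refl _) (by omega)
    unfold pvRowB
    rw [heq]
    rw [pvLoopA_closed w v c.toNat (c.toNat + 1) c 1 m (le_refl _) (by omega)
        (by omega) (by omega) (by omega) (by omega)]
    simp only [one_mul, List.map_append, List.map_map]
    congr 1
    have he : c - ((2:Int) ^ m - 1) = c + 1 - 2 ^ m := by ring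
    rw [he]
    split_ifs <;> simp

lemma foldl_eq (lis : List (List Int)) : ∀ acc : List (List Int),
    lis.foldl (fun res row =>
      match row with
      | [w, v, c] => res ++ pvLoopA w v (c.toNat + 1) c 1
      | _ => res) acc =
    lis.foldl (fun res row =>
      if row.length = 3 then res ++ pvRowB row[0]! row[1]! row[2]! else res) acc := by
  induction lis with
  | nil => intro acc; rfl
  | cons row rest ih =>
    intro acc
    simp only [List.foldl_cons]
    rw [ih]
    congr 1
    match row with
    | [] => rfl
    | [_] => rfl
    | [_, _] => rfl
    | [w, v, c] =>
      show acc ++ pvLoopA w v (c.toNat + 1) c 1 =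
        if ([w, v, c] : List Int).length = 3 then acc ++ pvRowB _ _ _ else acc
      simp [pvRow_eq w v c]
    | _ :: _ :: _ :: _ :: _ => rfl

-- ===== VERDICT (by name: the statement is the Claim_ definition above) =====
theorem article_breakdown_spec : Claim_equal_article_breakdown := by
  intro lis _ _
  unfold Spec_article_breakdown article_breakdown article_breakdown_alt
  exact foldl_eq lis []
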